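-- pv_equiv track=rewrite | github.com/MehdiRc/DataVisProject_Provenance | DataVis.py | showOnlyFilter
-- ===== SOURCE A (Python) =====
-- def showOnlyFilter(listOfTags, res):
--     filtered = []
--     temp = res
--     for i in range(len(listOfTags)):
--
--         for j in range(len(temp)):
--             if (listOfTags[i] in temp[j]):
--                 filtered.append(temp[j])
--
--         temp = filtered
--         filtered = []
--     return temp
-- ===== SOURCE B (Python) =====
-- def showOnlyFilter(listOfTags, res):
--     return [x for x in res if all(tag in x for tag in listOfTags)]
-- ===== Notes on version B (the rewrite author's own statement) =====
-- stated objective: simpler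
-- what changed: Replaces A's tag-outer repeated filtering (one full pass over the shrinking list per tag, rebuilding the list T times) with a single elements-outer pass keeping each row that contains all tags via all().
import Mathlib
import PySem

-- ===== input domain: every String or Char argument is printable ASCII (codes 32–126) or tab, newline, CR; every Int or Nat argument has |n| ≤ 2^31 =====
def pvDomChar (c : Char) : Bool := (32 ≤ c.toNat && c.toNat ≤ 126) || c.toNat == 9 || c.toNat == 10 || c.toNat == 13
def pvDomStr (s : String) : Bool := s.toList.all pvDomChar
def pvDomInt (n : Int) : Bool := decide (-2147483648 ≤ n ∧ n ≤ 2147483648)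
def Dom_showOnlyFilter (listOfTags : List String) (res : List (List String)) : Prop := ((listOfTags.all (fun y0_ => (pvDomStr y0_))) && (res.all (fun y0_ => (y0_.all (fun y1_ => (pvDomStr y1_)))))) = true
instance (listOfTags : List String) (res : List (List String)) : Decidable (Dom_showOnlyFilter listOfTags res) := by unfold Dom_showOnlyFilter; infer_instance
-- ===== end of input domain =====

-- B replaces A's tag-outer repeated filtering passes with one elements-outer pass using an all-tags check (objective: simpler).

-- ===== PORT A =====
-- outer loop over listOfTags; inner loop appends matching rows of temp to filtered, then temp := filtered
def showOnlyFilter (listOfTags : List String) (res : List (List String)) : List (List String) :=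
  listOfTags.foldl
    (fun temp tag =>
      temp.foldl (fun filtered row => if tag ∈ row then filtered ++ [row] else filtered) [])
    res

-- ===== PORT B =====
def showOnlyFilter_alt (listOfTags : List String) (res : List (List String)) : List (List String) :=
  res.filter (fun x => listOfTags.all (fun tag => tag ∈ x))

-- ===== PRECONDITION & SPEC =====
def Spec_showOnlyFilter (listOfTags : List String) (res : List (List String)) (out : List (List String)) : Prop := out = showOnlyFilter_alt listOfTags res
instance (listOfTags : List String) (res : List (List String)) (out : List (List String)) : Decidable (Spec_showOnlyFilter listOfTags res out) := by unfold Spec_showOnlyFilter; infer_instance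

-- ===== CLAIM (what is proved, stated in full; the proofs are below) =====
def Claim_equal_showOnlyFilter : Prop := ∀ (listOfTags : List String) (res : List (List String)), Dom_showOnlyFilter listOfTags res → Spec_showOnlyFilter listOfTags res (showOnlyFilter listOfTags res)

-- ===== LEMMAS AND PROOFS =====

-- A's inner append loop is a filter
theorem inner_filter (p : List String → Bool) (temp acc : List (List String)) :
    temp.foldl (fun filtered row => if p row then filtered ++ [row] else filtered) acc
      = acc ++ temp.filter p := by
  induction temp generalizing acc with
  | nil => simp
  | cons h t ih =>
      by_cases hp : p h <;> simp [List.filter, hp, ih]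

theorem foldl_filter_eq (listOfTags : List String) (res : List (List String)) :
    listOfTags.foldl (fun temp tag => temp.filter (fun row => tag ∈ row)) res
      = res.filter (fun x => listOfTags.all (fun tag => tag ∈ x)) := by
  induction listOfTags generalizing res with
  | nil => simp
  | cons h t ih =>
      simp only [List.foldl_cons, ih, List.filter_filter, List.all_cons]
      congr 1
      funext x
      by_cases hx : h ∈ x <;> simp [hx, Bool.and_comm]

-- ===== VERDICT (by name: the statement is the Claim_ definition above) =====
theorem showOnlyFilter_spec : Claim_equal_showOnlyFilter := by
  intro listOfTags res _
  unfold Spec_showOnlyFilter showOnlyFilter showOnlyFilter_alt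
  have h : ∀ (temp : List (List String)) (tag : String),
      temp.foldl (fun filtered row => if tag ∈ row then filtered ++ [row] else filtered) [] =
        temp.filter (fun row => tag ∈ row) := by
    intro temp tag
    simpa using inner_filter (fun row => decide (tag ∈ row)) temp []
  calc listOfTags.foldl
        (fun temp tag =>
          temp.foldl (fun filtered row => if tag ∈ row then filtered ++ [row] else filtered) []) res
      = listOfTags.foldl (fun temp tag => temp.filter (fun row => tag ∈ row)) res := by
        simp only [h]
    _ = res.filter (fun x => listOfTags.all (fun tag => tag ∈ x)) := foldl_filter_eq _ _
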